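-- pv_equiv track=rewrite | github.com/MurrellGroup/Protenix.jl | scripts/geometry_check_sidechain.py | _split_cif_row
-- ===== SOURCE A (Python) =====
-- def _split_cif_row(line: str):
--     out = []
--     i = 0
--     n = len(line)
--     while i < n:
--         while i < n and line[i].isspace():
--             i += 1
--         if i >= n:
--             break
--         if line[i] in ("'", '"'):
--             quote = line[i]
--             i += 1
--             start = i
--             while i < n and line[i] != quote:
--                 i += 1
--             out.append(line[start:i])
--             if i < n:
--                 i += 1
--             continue
--         start = i
--         while i < n and not line[i].isspace():
--             i += 1
--         out.append(line[start:i])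
--     return out
-- ===== SOURCE B (Python) =====
-- def _split_cif_row(line: str):
--     # Consume tokens from the front of the remaining (left-stripped) suffix,
--     # using partition to grab quoted tokens in one step.
--     out = []
--     rest = line.lstrip()
--     while rest:
--         q = rest[0]
--         if q in "'\"":
--             tok, _, rest = rest[1:].partition(q)
--         else:
--             k = next((j for j, ch in enumerate(rest) if ch.isspace()), len(rest))
--             tok, rest = rest[:k], rest[k:]
--         out.append(tok)
--         rest = rest.lstrip()
--     return out
-- ===== Notes on version B (the rewrite author's own statement) =====
-- stated objective: simpler
-- what changed: Replaced A's index-based state machine with three inner while-loops by a loop that repeatedly consumes a token from the front of the left-stripped remaining suffix, grabbing quoted tokens with str.partition and bare tokens at the first whitespace.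
import Mathlib
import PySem

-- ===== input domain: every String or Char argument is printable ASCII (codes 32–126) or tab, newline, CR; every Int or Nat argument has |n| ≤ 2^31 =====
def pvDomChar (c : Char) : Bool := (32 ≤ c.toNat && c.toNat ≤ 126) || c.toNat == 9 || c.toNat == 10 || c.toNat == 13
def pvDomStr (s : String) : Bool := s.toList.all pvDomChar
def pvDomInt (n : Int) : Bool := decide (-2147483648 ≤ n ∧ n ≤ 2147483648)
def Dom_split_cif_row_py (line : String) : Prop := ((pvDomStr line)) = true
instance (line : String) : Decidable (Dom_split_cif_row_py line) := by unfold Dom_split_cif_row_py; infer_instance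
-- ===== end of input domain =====

-- B re-implements the tokenizer by repeatedly consuming from the front of the
-- left-stripped suffix (partition-style) instead of A's index state machine;
-- objective: simpler. Equal return values on all inputs.

-- ===== PORT A =====
-- shared char predicates (Python's str.isspace on one char; membership in ("'", '"'))
def pvSp (c : Char) : Bool := PySem.Chars.isspace c
def pvIsQ (c : Char) : Bool := c = '\'' || c = '"'

-- "while i < n and p(line[i]): i += 1" — the shape of all three inner while loops of A
def pvScan (p : Char → Bool) (l : List Char) (i : Nat) : Nat :=
  if h : i < l.length ∧ p (l.getD i ' ') then pvScan p l (i + 1) else i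
termination_by l.length - i
decreasing_by omega

-- spec lemmas cited by pvALoop's decreasing_by (hence placed above the port)
theorem pvDropTW (p : Char → Bool) (d : List Char) :
    d.drop ((d.takeWhile p).length) = d.dropWhile p := by
  induction d with
  | nil => simp
  | cons a t ih =>
    cases hpa : p a
    · simp [List.takeWhile_cons, List.dropWhile_cons, hpa]
    · simp [List.takeWhile_cons, List.dropWhile_cons, hpa, ih]

theorem pvScan_spec (p : Char → Bool) (l : List Char) (i : Nat) :
    pvScan p l i = i + ((l.drop i).takeWhile p).length := by
  have H : ∀ N i, l.length - i ≤ N → pvScan p l i = i + ((l.drop i).takeWhile p).length := by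
    intro N
    induction N with
    | zero =>
      intro i hi
      have hd : l.drop i = [] := List.drop_eq_nil_of_le (by omega)
      rw [pvScan, dif_neg (fun h => absurd h.1 (by omega)), hd]
      simp
    | succ N ih =>
      intro i hi
      by_cases hlt : i < l.length
      · have hdrop : l.drop i = l[i] :: l.drop (i + 1) := List.drop_eq_getElem_cons hlt
        have hget : l.getD i ' ' = l[i] := List.getD_eq_getElem l ' ' hlt
        by_cases hp : p (l[i]) = true
        · rw [pvScan, dif_pos ⟨hlt, by rw [hget]; exact hp⟩, ih (i + 1) (by omega), hdrop,
            List.takeWhile_cons_of_pos hp, List.length_cons]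
          omega
        · rw [pvScan, dif_neg (fun h => hp (by rw [← hget]; exact h.2)), hdrop,
            List.takeWhile_cons_of_neg (by simp [hp])]
          simp
      · have hd : l.drop i = [] := List.drop_eq_nil_of_le (by omega)
        rw [pvScan, dif_neg (fun h => absurd h.1 hlt), hd]
        simp
  exact H (l.length - i) i le_rfl

theorem pvScan_ge (p : Char → Bool) (l : List Char) (i : Nat) : i ≤ pvScan p l i := by
  rw [pvScan_spec]; omega

theorem pvScan_drop (p : Char → Bool) (l : List Char) (i : Nat) :
    l.drop (pvScan p l i) = (l.drop i).dropWhile p := by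
  rw [pvScan_spec, ← List.drop_drop]
  exact pvDropTW p (l.drop i)

theorem pvDWhead {p : Char → Bool} : ∀ {l c rest : List Char} {ch : Char},
    List.dropWhile p l = ch :: rest → p ch = false := by
  intro l
  induction l with
  | nil => intro c rest ch h; simp at h
  | cons a t ih =>
    intro c rest ch h
    by_cases hp : p a = true
    · exact ih (c := c) (by simpa [List.dropWhile_cons, hp] using h)
    · rw [List.dropWhile_cons, if_neg (by simp [hp])] at h
      cases h; simpa using hp

theorem pvScan_stop (p : Char → Bool) (l : List Char) (i : Nat)
    (h : pvScan p l i < l.length) : p (l.getD (pvScan p l i) ' ') = false := by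
  have hdrop : l.drop (pvScan p l i) = (l.drop i).dropWhile p := pvScan_drop p l i
  have hget : l.getD (pvScan p l i) ' ' = l[pvScan p l i] := List.getD_eq_getElem l ' ' h
  have hcons : l.drop (pvScan p l i) = l[pvScan p l i] :: l.drop (pvScan p l i + 1) :=
    List.drop_eq_getElem_cons h
  rw [hcons] at hdrop
  rw [hget]
  exact pvDWhead (c := l.drop (pvScan p l i + 1)) hdrop.symm

theorem pvScan_ge_succ (p : Char → Bool) (l : List Char) (i : Nat)
    (hlt : i < l.length) (hp : p (l.getD i ' ') = true) : i + 1 ≤ pvScan p l i := by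
  rw [pvScan]; rw [dif_pos ⟨hlt, hp⟩]; exact pvScan_ge p l (i + 1)

-- "if i < n: i += 1" after a closing quote
def pvAdv (l : List Char) (e : Nat) : Nat := if e < l.length then e + 1 else e
-- line[start:i]  (exact here: 0 ≤ start ≤ i ≤ n always holds at the call sites)
def pvTok (l : List Char) (s e : Nat) : String := String.mk ((l.drop s).take (e - s))

-- A's outer while loop; pvScan pvSp l i is the whitespace-skip, then quote/bare token
def pvALoop (l : List Char) (i : Nat) (out : List String) : List String :=
  if hj : pvScan pvSp l i < l.length then
    if pvIsQ (l.getD (pvScan pvSp l i) ' ') then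
      pvALoop l
        (pvAdv l (pvScan (· != l.getD (pvScan pvSp l i) ' ') l (pvScan pvSp l i + 1)))
        (out ++ [pvTok l (pvScan pvSp l i + 1)
          (pvScan (· != l.getD (pvScan pvSp l i) ' ') l (pvScan pvSp l i + 1))])
    else
      pvALoop l (pvScan (fun c => !pvSp c) l (pvScan pvSp l i))
        (out ++ [pvTok l (pvScan pvSp l i)
          (pvScan (fun c => !pvSp c) l (pvScan pvSp l i))])
  else out
termination_by l.length - i
decreasing_by
  · have h1 : i ≤ pvScan pvSp l i := pvScan_ge pvSp l i
    have h2 : pvScan pvSp l i + 1 ≤ pvScan (· != l.getD (pvScan pvSp l i) ' ') l (pvScan pvSp l i + 1) :=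
      pvScan_ge _ l _
    unfold pvAdv; split <;> omega
  · have h1 : i ≤ pvScan pvSp l i := pvScan_ge pvSp l i
    have hs : pvSp (l.getD (pvScan pvSp l i) ' ') = false := pvScan_stop pvSp l i hj
    have h2 : pvScan pvSp l i + 1 ≤ pvScan (fun c => !pvSp c) l (pvScan pvSp l i) :=
      pvScan_ge_succ _ l _ hj (by rw [Bool.not_eq_eq_eq_not]; simpa using hs)
    omega

def split_cif_row_py (line : String) : List String := pvALoop line.toList 0 []

-- ===== PORT B =====
-- Source B's while loop over the left-stripped remaining suffix:
--   quoted: rest[1:].partition(q)  =  takeWhile (!= q) / dropWhile (!= q) minus the quote;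
--   bare:   rest[:k] / rest[k:] at the first whitespace  =  takeWhile / dropWhile non-space;
--   then rest.lstrip()  =  dropWhile pvSp.
def pvBLoop (r : List Char) : List String :=
  match r with
  | [] => []
  | c :: rest =>
    if pvIsQ c then
      String.mk (rest.takeWhile (· != c)) ::
        pvBLoop (((rest.dropWhile (· != c)).drop 1).dropWhile pvSp)
    else
      String.mk ((c :: rest).takeWhile (fun c => !pvSp c)) ::
        pvBLoop (((c :: rest).dropWhile (fun c => !pvSp c)).dropWhile pvSp)
termination_by r.length
decreasing_by
  · have h1 := List.length_dropWhile_le pvSp ((rest.dropWhile (· != c)).drop 1)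
    have h2 := List.length_dropWhile_le (· != c) rest
    have h3 : ((rest.dropWhile (· != c)).drop 1).length ≤ (rest.dropWhile (· != c)).length := by
      simp
    simp only [List.length_cons]; omega
  · by_cases hc : pvSp c = true
    · simp [List.dropWhile_cons, hc]
      have := List.length_dropWhile_le pvSp rest
      omega
    · simp only [List.dropWhile_cons, show (!pvSp c) = true by simp [hc], if_pos]
      have h1 := List.length_dropWhile_le (fun c => !pvSp c) rest
      have h2 := List.length_dropWhile_le pvSp (rest.dropWhile (fun c => !pvSp c))
      simp; omega

def split_cif_row_py_alt (line : String) : List String :=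
  pvBLoop (line.toList.dropWhile pvSp)

-- ===== PRECONDITION & SPEC =====
def Spec_split_cif_row_py (line : String) (out : List String) : Prop := out = split_cif_row_py_alt line
instance (line : String) (out : List String) : Decidable (Spec_split_cif_row_py line out) := by unfold Spec_split_cif_row_py; infer_instance

-- ===== CLAIM (what is proved, stated in full; the proofs are below) =====
def Claim_equal_split_cif_row_py : Prop := ∀ (line : String), Dom_split_cif_row_py line → Spec_split_cif_row_py line (split_cif_row_py line)

-- ===== LEMMAS AND PROOFS =====

theorem pvTakeTW (p : Char → Bool) (d : List Char) :
    d.take ((d.takeWhile p).length) = d.takeWhile p := by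
  induction d with
  | nil => simp
  | cons a t ih =>
    cases hpa : p a
    · simp [List.takeWhile_cons, hpa]
    · simp [List.takeWhile_cons, hpa, ih]

theorem pvScan_take (p : Char → Bool) (l : List Char) (i : Nat) :
    (l.drop i).take (pvScan p l i - i) = (l.drop i).takeWhile p := by
  rw [pvScan_spec, Nat.add_sub_cancel_left]
  exact pvTakeTW p (l.drop i)


theorem pvMain (l : List Char) :
    ∀ N i out, l.length - i ≤ N →
      pvALoop l i out = out ++ pvBLoop ((l.drop i).dropWhile pvSp) := by
  intro N
  induction N with
  | zero =>
    intro i out hi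
    rw [pvALoop]
    have hge : l.length ≤ i := by omega
    have hj : ¬ pvScan pvSp l i < l.length := by
      have := pvScan_ge pvSp l i; omega
    rw [dif_neg hj]
    simp [List.drop_eq_nil_of_le hge, pvBLoop]
  | succ N ih =>
    intro i out hi
    rw [pvALoop]
    by_cases hj : pvScan pvSp l i < l.length
    · rw [dif_pos hj]
      have hdropj : l.drop (pvScan pvSp l i) = (l.drop i).dropWhile pvSp := pvScan_drop pvSp l i
      have hget : l.getD (pvScan pvSp l i) ' ' = l[pvScan pvSp l i] :=
        List.getD_eq_getElem l ' ' hj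
      have hcons : l.drop (pvScan pvSp l i) = l[pvScan pvSp l i] :: l.drop (pvScan pvSp l i + 1) :=
        List.drop_eq_getElem_cons hj
      have hBarg : (l.drop i).dropWhile pvSp = l[pvScan pvSp l i] :: l.drop (pvScan pvSp l i + 1) := by
        rw [← hdropj]; exact hcons
      have hskip : i ≤ pvScan pvSp l i := pvScan_ge pvSp l i
      rw [hBarg, pvBLoop]
      by_cases hq : pvIsQ (l[pvScan pvSp l i]) = true
      · rw [if_pos (by rw [hget]; exact hq), if_pos hq]
        -- token equality
        have htok : pvTok l (pvScan pvSp l i + 1)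
            (pvScan (· != l.getD (pvScan pvSp l i) ' ') l (pvScan pvSp l i + 1))
            = String.mk ((l.drop (pvScan pvSp l i + 1)).takeWhile (· != l[pvScan pvSp l i])) := by
          unfold pvTok
          rw [hget, pvScan_take]
        -- recursive argument equality
        have he : pvScan pvSp l i + 1 ≤ pvScan (· != l.getD (pvScan pvSp l i) ' ') l (pvScan pvSp l i + 1) :=
          pvScan_ge _ l _
        have harg : l.drop (pvAdv l (pvScan (· != l.getD (pvScan pvSp l i) ' ') l (pvScan pvSp l i + 1)))
            = ((l.drop (pvScan pvSp l i + 1)).dropWhile (· != l[pvScan pvSp l i])).drop 1 := by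
          rw [← hget, ← pvScan_drop (· != l.getD (pvScan pvSp l i) ' ') l (pvScan pvSp l i + 1)]
          unfold pvAdv
          by_cases hcase : pvScan (· != l.getD (pvScan pvSp l i) ' ') l (pvScan pvSp l i + 1) < l.length
          · rw [if_pos hcase, List.drop_drop]
          · rw [if_neg hcase, List.drop_eq_nil_of_le (by omega)]
            simp
        have hbound : l.length - pvAdv l (pvScan (· != l.getD (pvScan pvSp l i) ' ') l (pvScan pvSp l i + 1)) ≤ N := by
          unfold pvAdv
          by_cases hcase : pvScan (· != l.getD (pvScan pvSp l i) ' ') l (pvScan pvSp l i + 1) < l.length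
          · rw [if_pos hcase]; omega
          · rw [if_neg hcase]; omega
        rw [ih _ (out ++ [_]) hbound]
        rw [harg, htok, List.append_assoc]
        rfl
      · rw [if_neg (by rw [hget]; exact by simpa using hq), if_neg hq]
        have hs : pvSp (l.getD (pvScan pvSp l i) ' ') = false := pvScan_stop pvSp l i hj
        have hsg : pvSp (l[pvScan pvSp l i]) = false := by rw [← hget]; exact hs
        have he : pvScan pvSp l i + 1 ≤ pvScan (fun c => !pvSp c) l (pvScan pvSp l i) :=
          pvScan_ge_succ _ l _ hj (by rw [Bool.not_eq_eq_eq_not]; simpa using hs)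
        have htok : pvTok l (pvScan pvSp l i) (pvScan (fun c => !pvSp c) l (pvScan pvSp l i))
            = String.mk ((l[pvScan pvSp l i] :: l.drop (pvScan pvSp l i + 1)).takeWhile (fun c => !pvSp c)) := by
          unfold pvTok
          rw [pvScan_take, hcons]
        have harg : l.drop (pvScan (fun c => !pvSp c) l (pvScan pvSp l i))
            = (l[pvScan pvSp l i] :: l.drop (pvScan pvSp l i + 1)).dropWhile (fun c => !pvSp c) := by
          rw [pvScan_drop, hcons]
        rw [ih _ (out ++ [_]) (by omega)]
        rw [harg, htok, List.append_assoc]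
        rfl
    · rw [dif_neg hj]
      have : l.drop (pvScan pvSp l i) = [] := List.drop_eq_nil_of_le (by omega)
      rw [← pvScan_drop pvSp l i, this, pvBLoop]
      simp

-- ===== VERDICT (by name: the statement is the Claim_ definition above) =====
theorem split_cif_row_py_spec : Claim_equal_split_cif_row_py := by
  intro line _
  unfold Spec_split_cif_row_py split_cif_row_py split_cif_row_py_alt
  have := pvMain line.toList line.toList.length 0 [] (by omega)
  simpa using this
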